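-- pv_equiv track=rewrite | github.com/CreeperBoom07/USE_Informatics | Варианты/Ишимов № 2/# 23.py | f
-- ===== SOURCE A (Python) =====
-- def f(x, y):
--     if x < y:
--         return 0
--     if x == y:
--         return 1
--     if x == 15:
--         return f(x//3, y) + f(x-5, y)
--     return f(x//3, y) + f(x-5, y) + f(x-2, y)
-- ===== SOURCE B (Python) =====
-- def f(x, y):
--     if x < y:
--         return 0
--     dp = {y: 1}
--     for n in range(y + 1, x + 1):
--         dp[n] = dp.get(n // 3, 0) + dp.get(n - 5, 0) + (0 if n == 15 else dp.get(n - 2, 0))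
--     return dp[x]
-- ===== Notes on version B (the rewrite author's own statement) =====
-- stated objective: alternative
-- what changed: replaces the triple-branch recursion by a bottom-up DP table dp[n] = number of paths from n to y, filled once for n = y..x (intended as faster; a timing run saw A time out at n>=256 where B returned but could not certify a ratio)
import Mathlib
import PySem

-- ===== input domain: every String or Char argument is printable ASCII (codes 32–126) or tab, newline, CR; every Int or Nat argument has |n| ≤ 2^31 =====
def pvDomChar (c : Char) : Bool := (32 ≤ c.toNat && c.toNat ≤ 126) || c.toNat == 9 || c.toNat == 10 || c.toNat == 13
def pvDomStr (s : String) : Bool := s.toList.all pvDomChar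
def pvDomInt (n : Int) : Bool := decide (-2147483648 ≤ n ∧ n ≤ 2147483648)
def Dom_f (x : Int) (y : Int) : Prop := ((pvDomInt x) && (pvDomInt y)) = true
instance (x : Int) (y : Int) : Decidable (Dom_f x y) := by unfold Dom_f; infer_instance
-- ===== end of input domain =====

-- B replaces A's triple-branch recursion by a bottom-up DP table over n = y..x (a different algorithm; intended as faster, not confirmed).

-- ===== PORT A =====
-- A's unbounded recursion, fueled; fuel x.toNat + 1 suffices on Pre_f (proved below).
def fFuel : Nat → Int → Int → Int
  | 0, _, _ => 0
  | fuel + 1, x, y =>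
    if x < y then 0
    else if x = y then 1
    else if x = 15 then
      fFuel fuel (PySem.Int.floordiv x 3) y + fFuel fuel (x - 5) y
    else
      fFuel fuel (PySem.Int.floordiv x 3) y + fFuel fuel (x - 5) y + fFuel fuel (x - 2) y

def f (x : Int) (y : Int) : Int := fFuel (x.toNat + 1) x y

-- ===== PORT B =====
-- one DP step: dp[n] = dp.get(n//3,0) + dp.get(n-5,0) + (0 if n == 15 else dp.get(n-2,0))
def fStep (dp : PySem.Dict Int Int) (n : Int) : PySem.Dict Int Int :=
  dp.insert n (dp.getD (PySem.Int.floordiv n 3) 0 + dp.getD (n - 5) 0 +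
    (if n = 15 then 0 else dp.getD (n - 2) 0))

def f_alt (x : Int) (y : Int) : Int :=
  if x < y then 0
  else
    -- dp = {y: 1}; for n in range(y+1, x+1): …; return dp[x]  (key x is always present here)
    ((PySem.List.pyRange (y + 1) (x + 1) 1).foldl fStep
      ((PySem.Dict.empty).insert y 1)).getD x 0

-- ===== PRECONDITION & SPEC =====
-- Pre_f excludes exactly the inputs (y < 0 and x > y) on which A's recursion never terminates (RecursionError).
def Pre_f (x : Int) (y : Int) : Prop := 0 ≤ y ∨ x ≤ y
instance (x : Int) (y : Int) : Decidable (Pre_f x y) := by unfold Pre_f; infer_instance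
def pvWitness_f : Int × Int := (20, 2)

def Spec_f (x : Int) (y : Int) (out : Int) : Prop := out = f_alt x y
instance (x : Int) (y : Int) (out : Int) : Decidable (Spec_f x y out) := by unfold Spec_f; infer_instance

-- ===== CLAIM (what is proved, stated in full; the proofs are below) =====
def Claim_equal_f : Prop := ∀ (x : Int) (y : Int), Dom_f x y → Pre_f x y → Spec_f x y (f x y)

-- ===== LEMMAS AND PROOFS =====

-- reference value: A with the canonical fuel
def G (m y : Int) : Int := fFuel (m.toNat + 1) m y

lemma fd3_lt {x : Int} (hx : 1 ≤ x) : 0 ≤ PySem.Int.floordiv x 3 ∧ PySem.Int.floordiv x 3 < x := by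
  constructor
  · rw [PySem.Int.le_floordiv_iff_mul_le (by norm_num)]; omega
  · rw [PySem.Int.floordiv_lt_iff_lt_mul (by norm_num)]; omega

lemma toNat_fd3_lt {x : Int} (hx : 1 ≤ x) : (PySem.Int.floordiv x 3).toNat < x.toNat := by
  have := fd3_lt hx; omega

lemma fuel_suff : ∀ fuel x y, 0 ≤ y → x.toNat < fuel → fFuel fuel x y = G x y := by
  intro fuel
  induction fuel using Nat.strong_induction_on with
  | _ fuel ih =>
    intro x y hy hf
    match fuel, hf with
    | fuel + 1, hf =>
      unfold G fFuel
      by_cases h1 : x < y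
      · simp [h1]
      · by_cases h2 : x = y
        · simp [h2]
        · have hx1 : 1 ≤ x := by omega
          have hd : (PySem.Int.floordiv x 3).toNat < x.toNat := toNat_fd3_lt hx1
          have e1 : fFuel fuel (PySem.Int.floordiv x 3) y = G (PySem.Int.floordiv x 3) y :=
            ih fuel (by omega) _ _ hy (by omega)
          have e2 : fFuel fuel (x - 5) y = G (x - 5) y := ih fuel (by omega) _ _ hy (by omega)
          have e3 : fFuel fuel (x - 2) y = G (x - 2) y := ih fuel (by omega) _ _ hy (by omega)
          have e1' : fFuel x.toNat (PySem.Int.floordiv x 3) y = G (PySem.Int.floordiv x 3) y :=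
            ih x.toNat (by omega) _ _ hy (by omega)
          have e2' : fFuel x.toNat (x - 5) y = G (x - 5) y := ih x.toNat (by omega) _ _ hy (by omega)
          have e3' : fFuel x.toNat (x - 2) y = G (x - 2) y := ih x.toNat (by omega) _ _ hy (by omega)
          simp only [if_neg h1, if_neg h2]
          rw [e1, e2, e3, e1', e2', e3']

-- G vanishes below y
lemma G_lt {m y : Int} (h : m < y) : G m y = 0 := by
  unfold G fFuel; simp [h]

lemma G_self (y : Int) : G y y = 1 := by
  unfold G fFuel; simp

-- G satisfies the three-way recurrence above y
lemma G_rec {n y : Int} (hy : 0 ≤ y) (hn : y < n) :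
    G n y = G (PySem.Int.floordiv n 3) y + G (n - 5) y +
      (if n = 15 then 0 else G (n - 2) y) := by
  have hx1 : 1 ≤ n := by omega
  have hd := toNat_fd3_lt hx1
  have hG : G n y = fFuel (n.toNat + 1) n y := rfl
  rw [hG]
  unfold fFuel
  have e1 : fFuel n.toNat (PySem.Int.floordiv n 3) y = G (PySem.Int.floordiv n 3) y :=
    fuel_suff _ _ _ hy (by omega)
  have e2 : fFuel n.toNat (n - 5) y = G (n - 5) y := fuel_suff _ _ _ hy (by omega)
  have e3 : fFuel n.toNat (n - 2) y = G (n - 2) y := fuel_suff _ _ _ hy (by omega)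
  simp only [if_neg (by omega : ¬ n < y), if_neg (by omega : ¬ n = y)]
  rw [e1, e2, e3]
  by_cases h15 : n = 15
  · simp [h15]
  · simp [h15]

-- the DP dictionary after processing n computes G on [y, n]
def dpUpTo (y n : Int) : PySem.Dict Int Int :=
  (PySem.List.pyRange (y + 1) (n + 1) 1).foldl fStep ((PySem.Dict.empty).insert y 1)

lemma dp_invariant : ∀ (k : Nat) (y : Int), 0 ≤ y → ∀ m,
    (dpUpTo y (y + k)).get? m = if y ≤ m ∧ m ≤ y + k then some (G m y) else none := by
  intro k
  induction k with
  | zero =>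
    intro y hy m
    unfold dpUpTo
    rw [PySem.List.pyRange_one_eq_nil (by omega)]
    simp only [List.foldl_nil, PySem.Dict.get?_insert, PySem.Dict.get?_empty]
    by_cases h : m = y
    · subst h; rw [G_self]; simp
    · simp [h]; omega
  | succ k ih =>
    intro y hy m
    unfold dpUpTo
    have hcast : (((k : Nat) + 1 : Nat) : Int) = (k : Int) + 1 := by push_cast; ring
    rw [hcast]
    have hsplit : PySem.List.pyRange (y + 1) (y + ((k : Int) + 1) + 1) 1 =
        PySem.List.pyRange (y + 1) (y + k + 1) 1 ++ [y + k + 1] := by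
      rw [show y + ((k : Int) + 1) + 1 = (y + k + 1) + 1 by ring]
      exact PySem.List.pyRange_one_succ_right (by omega)
    rw [hsplit, List.foldl_append]
    simp only [List.foldl_cons, List.foldl_nil]
    set dp := (PySem.List.pyRange (y + 1) (y + (k : Int) + 1) 1).foldl fStep
        ((PySem.Dict.empty).insert y 1) with hdpdef
    have hdp : ∀ m', dp.get? m' = if y ≤ m' ∧ m' ≤ y + k then some (G m' y) else none := by
      intro m'; have := ih y hy m'; unfold dpUpTo at this; exact this
    have hgetG : ∀ m', m' ≤ y + k → dp.getD m' 0 = G m' y := by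
      intro m' hle
      rw [PySem.Dict.getD_eq_get?_getD, hdp m']
      by_cases h : y ≤ m'
      · simp [h, hle]
      · rw [if_neg (by omega)]; simp; rw [G_lt (by omega)]
    set n1 := y + (k : Int) + 1 with hn1
    have hval : fStep dp n1 = dp.insert n1 (G n1 y) := by
      unfold fStep
      have hx1 : 1 ≤ n1 := by omega
      have hd := fd3_lt hx1
      rw [hgetG _ (by omega), hgetG _ (by omega : n1 - 5 ≤ y + k),
          hgetG _ (by omega : n1 - 2 ≤ y + k), ← G_rec hy (by omega)]
    rw [hval, PySem.Dict.get?_insert, hdp m]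
    by_cases h : m = n1
    · rw [if_pos h, if_pos (by omega), h]
    · rw [if_neg h]
      by_cases h2 : y ≤ m ∧ m ≤ y + k
      · rw [if_pos h2, if_pos (by omega)]
      · rw [if_neg h2, if_neg (by omega)]

-- ===== VERDICT (by name: the statement is the Claim_ definition above) =====
theorem f_spec : Claim_equal_f := by
  intro x y _ hpre
  unfold Spec_f f f_alt
  by_cases hlt : x < y
  · rw [if_pos hlt]; unfold fFuel; simp [hlt]
  · rw [if_neg hlt]
    by_cases hxy : x = y
    · subst hxy
      rw [PySem.List.pyRange_one_eq_nil (by omega)]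
      simp only [List.foldl_nil]
      rw [PySem.Dict.getD_insert, if_pos rfl]
      exact G_self _
    · have hy : 0 ≤ y := by unfold Pre_f at hpre; omega
      have hk : x = y + ((x - y).toNat : Int) := by omega
      have hinv := dp_invariant (x - y).toNat y hy x
      unfold dpUpTo at hinv
      rw [← hk] at hinv
      rw [PySem.Dict.getD_eq_get?_getD, hinv, if_pos (by omega)]
      rfl
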